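-- pv_equiv track=rewrite | github.com/0417taehyun/algo-gago | 01_이것이_취업을_위한_코딩_테스트다/1주차_그리디/01_스터디내용/이현진/무지의먹방라이브.py | solution
-- ===== SOURCE A (Python) =====
-- def solution(food_times, k):
--     answer = 0
--     food_amount = len(food_times)
--
--     for i in range(1,k+1):
--         if food_times[i%food_amount-1] < 1:
--             continue
--         food_times[i%food_amount-1] -= 1
--         answer = i%food_amount
--
--     return answer
-- ===== SOURCE B (Python) =====
-- def solution(food_times, k):
--     # Closed form per food: food j (0-based) is visited at steps j+1, j+1+n, ...;
--     # it is eaten on its first min(max(food,0), visits) visits. The answer is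
--     # (j+1) % n for the food whose last eating step is largest (0 if none eats).
--     n = len(food_times)
--     best_step = 0
--     answer = 0
--     for j, ft in enumerate(food_times):
--         visits = (k - j - 1) // n + 1 if k >= j + 1 else 0
--         eats = min(max(ft, 0), visits)
--         if eats >= 1:
--             last = j + 1 + (eats - 1) * n
--             if last > best_step:
--                 best_step = last
--                 answer = (j + 1) % n
--     return answer
-- ===== Notes on version B (the rewrite author's own statement) =====
-- stated objective: alternative
-- what changed: Replaces the step-by-step simulation of all k seconds (repeatedly decrementing the list) with a per-food closed form (visit/eat counts) and a single pass over the foods taking the one with the largest last eating step; B also does not mutate food_times (A does).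
import Mathlib
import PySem

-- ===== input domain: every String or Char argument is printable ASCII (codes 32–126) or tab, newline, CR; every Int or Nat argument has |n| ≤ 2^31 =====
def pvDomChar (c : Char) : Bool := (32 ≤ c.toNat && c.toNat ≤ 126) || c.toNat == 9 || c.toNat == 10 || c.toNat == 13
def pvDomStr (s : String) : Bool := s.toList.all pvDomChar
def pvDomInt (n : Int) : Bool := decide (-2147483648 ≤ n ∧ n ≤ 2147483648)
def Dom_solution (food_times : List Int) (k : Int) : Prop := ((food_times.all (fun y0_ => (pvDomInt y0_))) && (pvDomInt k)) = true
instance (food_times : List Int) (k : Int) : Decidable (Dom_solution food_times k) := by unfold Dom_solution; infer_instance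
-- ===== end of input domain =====

-- B replaces A's second-by-second simulation by a per-food closed form (a single pass over the foods);
-- A mutates food_times in place, B does not: the equivalence proved is about the return value only.

-- ===== PORT A =====
def solution (food_times : List Int) (k : Int) : Int :=
  ((PySem.List.pyRange 1 (k + 1) 1).foldl
    (fun (st : List Int × Int) (i : Int) =>
      if PySem.List.pyGetD st.1 (PySem.Int.mod i (PySem.List.len food_times) - 1) 0 < 1 then st
      else (PySem.List.pySetD st.1 (PySem.Int.mod i (PySem.List.len food_times) - 1)
              (PySem.List.pyGetD st.1 (PySem.Int.mod i (PySem.List.len food_times) - 1) 0 - 1),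
            PySem.Int.mod i (PySem.List.len food_times)))
    (food_times, 0)).2

-- ===== PORT B =====
def solution_alt (food_times : List Int) (k : Int) : Int :=
  ((PySem.List.enumerate food_times 0).foldl
    (fun (st : Int × Int) (p : Int × Int) =>
      let visits : Int := if p.1 + 1 ≤ k then PySem.Int.floordiv (k - p.1 - 1) (PySem.List.len food_times) + 1 else 0
      let eats : Int := min (max p.2 0) visits
      if 1 ≤ eats then
        let last : Int := p.1 + 1 + (eats - 1) * PySem.List.len food_times
        if st.1 < last then (last, PySem.Int.mod (p.1 + 1) (PySem.List.len food_times)) else st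
      else st)
    (0, 0)).2

-- ===== PRECONDITION & SPEC =====
-- A raises ZeroDivisionError (i % 0) when food_times is empty and the loop runs (k ≥ 1); that is all Pre_ excludes.
def Pre_solution (food_times : List Int) (k : Int) : Prop := food_times ≠ [] ∨ k < 1
instance (food_times : List Int) (k : Int) : Decidable (Pre_solution food_times k) := by unfold Pre_solution; infer_instance
def pvWitness_solution : List Int × Int := ([3, 1, 2], 5)

def Spec_solution (food_times : List Int) (k : Int) (out : Int) : Prop := out = solution_alt food_times k
instance (food_times : List Int) (k : Int) (out : Int) : Decidable (Spec_solution food_times k out) := by unfold Spec_solution; infer_instance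

-- ===== CLAIM (what is proved, stated in full; the proofs are below) =====
def Claim_equal_solution : Prop := ∀ (food_times : List Int) (k : Int), Dom_solution food_times k → Pre_solution food_times k → Spec_solution food_times k (solution food_times k)
-- ===== LEMMAS AND PROOFS =====

-- Proof-side copies of the two loop bodies (definitionally equal to the lambdas in the ports).
def pvVisits (n k j : Int) : Int :=
  if j + 1 ≤ k then PySem.Int.floordiv (k - j - 1) n + 1 else 0

def pvEats (ft v : Int) : Int := min (max ft 0) v

def pvLast (n k j ft : Int) : Int := j + 1 + (pvEats ft (pvVisits n k j) - 1) * n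

def pvBStep (n k : Int) (st : Int × Int) (p : Int × Int) : Int × Int :=
  if 1 ≤ pvEats p.2 (pvVisits n k p.1) then
    if st.1 < pvLast n k p.1 p.2 then (pvLast n k p.1 p.2, PySem.Int.mod (p.1 + 1) n) else st
  else st

def pvAStep (n : Int) (st : List Int × Int) (i : Int) : List Int × Int :=
  if PySem.List.pyGetD st.1 (PySem.Int.mod i n - 1) 0 < 1 then st
  else (PySem.List.pySetD st.1 (PySem.Int.mod i n - 1) (PySem.List.pyGetD st.1 (PySem.Int.mod i n - 1) 0 - 1),
        PySem.Int.mod i n)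

-- the state of A's food list after m seconds, in closed form
def pvFState (ft0 : List Int) (k : Int) : List Int :=
  ft0.mapIdx (fun j ft => ft - pvEats ft (pvVisits (ft0.length : Int) k (j : Int)))

lemma pv_sol_eq (ft : List Int) (k : Int) :
    solution ft k = ((PySem.List.pyRange 1 (k + 1) 1).foldl (pvAStep ((ft.length : Int))) (ft, 0)).2 := rfl

lemma pv_alt_eq (ft : List Int) (k : Int) :
    solution_alt ft k = ((PySem.List.enumerate ft 0).foldl (pvBStep ((ft.length : Int)) k) (0, 0)).2 := rfl

-- ---------- arithmetic lemmas ----------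

lemma pv_divmod_eq {n : Int} (q r : Int) (hn : 0 < n) (h0 : 0 ≤ r) (hr : r < n) :
    (n * q + r) / n = q ∧ (n * q + r) % n = r := by
  constructor
  · rw [show n * q + r = r + q * n by ring, Int.add_mul_ediv_right _ _ (ne_of_gt hn),
      Int.ediv_eq_zero_of_lt h0 hr, zero_add]
  · rw [show n * q + r = r + n * q by ring, Int.add_mul_emod_self_left, Int.emod_eq_of_lt h0 hr]

lemma pv_divmod_succ {n m : Int} (hn : 0 < n) (hm : 0 ≤ m) :
    ((m + 1) / n = m / n ∧ (m + 1) % n = m % n + 1) ∨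
    ((m + 1) / n = m / n + 1 ∧ (m + 1) % n = 0 ∧ m % n = n - 1) := by
  have e := Int.ediv_add_emod m n
  have hr0 : 0 ≤ m % n := Int.emod_nonneg m (ne_of_gt hn)
  have hrn : m % n < n := Int.emod_lt_of_pos m hn
  by_cases hc : m % n + 1 < n
  · left
    have h := pv_divmod_eq (n := n) (m / n) (m % n + 1) hn (by omega) hc
    have hm1 : m + 1 = n * (m / n) + (m % n + 1) := by linarith
    rw [hm1]; exact h
  · right
    have hceq : m % n = n - 1 := by omega
    have h := pv_divmod_eq (n := n) (m / n + 1) 0 hn le_rfl hn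
    have hmul : n * (m / n + 1) = n * (m / n) + n := by ring
    have hm1 : m + 1 = n * (m / n + 1) + 0 := by omega
    rw [hm1]; exact ⟨h.1, h.2, hceq⟩

lemma pv_visits_closed {n m j : Int} (hn : 0 < n) (hj0 : 0 ≤ j) (hjn : j < n) (hm : 0 ≤ m) :
    pvVisits n m j = m / n + (if j < m % n then 1 else 0) := by
  have e := Int.ediv_add_emod m n
  have hr0 : 0 ≤ m % n := Int.emod_nonneg m (ne_of_gt hn)
  have hrn : m % n < n := Int.emod_lt_of_pos m hn
  have hrm : m % n ≤ m := by
    by_cases hmn : m < n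
    · rw [Int.emod_eq_of_lt hm hmn]
    · omega
  unfold pvVisits
  split_ifs with h1 h2 h2
  · rw [PySem.Int.floordiv_eq_ediv_of_pos hn]
    have hd : m - j - 1 = (m % n - j - 1) + (m / n) * n := by linarith
    rw [hd, Int.add_mul_ediv_right _ _ (ne_of_gt hn),
      Int.ediv_eq_zero_of_lt (by omega) (by omega)]
    omega
  · rw [PySem.Int.floordiv_eq_ediv_of_pos hn]
    have hd : m - j - 1 = (m % n - j - 1 + n) + (m / n - 1) * n := by linarith
    rw [hd, Int.add_mul_ediv_right _ _ (ne_of_gt hn),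
      Int.ediv_eq_zero_of_lt (by omega) (by omega)]
    omega
  · omega
  · have hq : m / n = 0 := Int.ediv_eq_zero_of_lt hm (by omega)
    omega

lemma pv_visits_succ {n m j : Int} (hn : 0 < n) (hj0 : 0 ≤ j) (hjn : j < n) (hm : 0 ≤ m) :
    pvVisits n (m + 1) j = pvVisits n m j + (if j = m % n then 1 else 0) := by
  have hr0 : 0 ≤ m % n := Int.emod_nonneg m (ne_of_gt hn)
  have hrn : m % n < n := Int.emod_lt_of_pos m hn
  rw [pv_visits_closed hn hj0 hjn (by omega), pv_visits_closed hn hj0 hjn hm]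
  rcases pv_divmod_succ hn hm with ⟨h1, h2⟩ | ⟨h1, h2, h3⟩ <;> rw [h1, h2] <;>
    split_ifs <;> omega

lemma pv_visits_nonneg {n m j : Int} (hn : 0 < n) (hj0 : 0 ≤ j) : 0 ≤ pvVisits n m j := by
  unfold pvVisits
  split_ifs with h
  · rw [PySem.Int.floordiv_eq_ediv_of_pos hn]
    have := Int.ediv_nonneg (show (0:Int) ≤ m - j - 1 by omega) (le_of_lt hn)
    omega
  · omega

lemma pv_eats_le {ft v : Int} : pvEats ft v ≤ v := by unfold pvEats; omega

lemma pv_eats_succ {ft v : Int} (hv : 0 ≤ v) :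
    pvEats ft (v + 1) = pvEats ft v + (if v < max ft 0 then 1 else 0) := by
  unfold pvEats; split_ifs <;> omega

lemma pv_eatcond {ft v : Int} (hv : 0 ≤ v) : (1 ≤ ft - pvEats ft v ↔ v < max ft 0) := by
  unfold pvEats; omega

lemma pv_eats_eq {ft v : Int} (hv : 0 ≤ v) (h : v < max ft 0) : pvEats ft v = v := by
  unfold pvEats; omega

lemma pv_last_le {n m j ft : Int} (hn : 0 < n) (hm : 0 ≤ m) (hj0 : 0 ≤ j) (hjn : j < n)
    (he : 1 ≤ pvEats ft (pvVisits n (m + 1) j)) :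
    pvLast n (m + 1) j ft ≤ m + 1 ∧ (pvLast n (m + 1) j ft = m + 1 → j = m % n) := by
  have hcl := pv_visits_closed hn hj0 hjn (show (0:Int) ≤ m + 1 by omega)
  have hle : pvEats ft (pvVisits n (m + 1) j) ≤ pvVisits n (m + 1) j := pv_eats_le
  have e1 := Int.ediv_add_emod (m + 1) n
  have hr0 : 0 ≤ (m + 1) % n := Int.emod_nonneg _ (ne_of_gt hn)
  have hrn : (m + 1) % n < n := Int.emod_lt_of_pos _ hn
  have hm0 : 0 ≤ m % n := Int.emod_nonneg m (ne_of_gt hn)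
  have hmn : m % n < n := Int.emod_lt_of_pos m hn
  set e := pvEats ft (pvVisits n (m + 1) j) with hedef
  unfold pvLast
  rw [← hedef, hcl] at *
  rcases pv_divmod_succ hn hm with ⟨h1, h2⟩ | ⟨h1, h2, h3⟩
  · by_cases hj : j < (m + 1) % n
    · rw [if_pos hj] at hle
      have hmul : (e - 1) * n ≤ ((m + 1) / n) * n :=
        mul_le_mul_of_nonneg_right (by omega) (by omega)
      constructor
      · linarith
      · intro heq
        by_cases he2 : e ≤ (m + 1) / n
        · exfalso
          have hmul2 : (e - 1) * n ≤ ((m + 1) / n - 1) * n :=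
            mul_le_mul_of_nonneg_right (by omega) (by omega)
          nlinarith
        · have he3 : e = (m + 1) / n + 1 := by omega
          rw [he3] at heq
          have : j + 1 = (m + 1) % n := by nlinarith
          omega
    · rw [if_neg hj] at hle
      have hq1 : 1 ≤ (m + 1) / n := by omega
      have hmul : (e - 1) * n ≤ ((m + 1) / n - 1) * n :=
        mul_le_mul_of_nonneg_right (by omega) (by omega)
      constructor
      · nlinarith
      · intro heq
        have hmul2 : (1 : Int) * n ≤ ((m + 1) / n - e + 1) * n :=
          mul_le_mul_of_nonneg_right (by omega) (by omega)
        have hge : n + (m + 1) % n ≤ j + 1 := by nlinarith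
        omega
  · by_cases hj : j < (m + 1) % n
    · rw [if_pos hj] at hle
      omega
    · rw [if_neg hj] at hle
      have hq1 : 1 ≤ (m + 1) / n := by omega
      have hmul : (e - 1) * n ≤ ((m + 1) / n - 1) * n :=
        mul_le_mul_of_nonneg_right (by omega) (by omega)
      constructor
      · nlinarith
      · intro heq
        have hmul2 : (1 : Int) * n ≤ ((m + 1) / n - e + 1) * n :=
          mul_le_mul_of_nonneg_right (by omega) (by omega)
        have hge : n + (m + 1) % n ≤ j + 1 := by nlinarith
        omega

lemma pv_last_eat {n m ft : Int} (hn : 0 < n) (hm : 0 ≤ m)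
    (hv : pvVisits n m (m % n) < max ft 0) :
    1 ≤ pvEats ft (pvVisits n (m + 1) (m % n)) ∧ pvLast n (m + 1) (m % n) ft = m + 1 := by
  have hj0 : 0 ≤ m % n := Int.emod_nonneg m (ne_of_gt hn)
  have hjn : m % n < n := Int.emod_lt_of_pos m hn
  have hv0 : 0 ≤ pvVisits n m (m % n) := pv_visits_nonneg hn hj0
  have hs := pv_visits_succ (j := m % n) hn hj0 hjn hm
  rw [if_pos rfl] at hs
  have he := pv_eats_succ (ft := ft) hv0
  rw [if_pos hv] at he
  have he2 := pv_eats_eq hv0 hv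
  have hvc := pv_visits_closed (j := m % n) hn hj0 hjn hm
  rw [if_neg (lt_irrefl _)] at hvc
  have e1 := Int.ediv_add_emod m n
  constructor
  · rw [hs, he, he2]; omega
  · unfold pvLast
    rw [hs, he, he2, hvc]
    have : (m % n + 1) + (m / n + 0 + 1 - 1) * n = m + 1 := by linarith
    linarith

-- ---------- fold lemmas for B's loop ----------

lemma pv_bfold_id {n k : Int} :
    ∀ (l : List (Int × Int)) (acc : Int × Int),
      (∀ p ∈ l, 1 ≤ pvEats p.2 (pvVisits n k p.1) → pvLast n k p.1 p.2 ≤ acc.1) →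
      l.foldl (pvBStep n k) acc = acc := by
  intro l
  induction l with
  | nil => intro acc _; rfl
  | cons p l ih =>
    intro acc h
    have hstep : pvBStep n k acc p = acc := by
      unfold pvBStep
      split_ifs with h1 h2
      · exact absurd h2 (by have := h p (by simp) h1; omega)
      · rfl
      · rfl
    rw [List.foldl_cons, hstep]
    exact ih acc (fun q hq hq2 => h q (by simp [hq]) hq2)

lemma pv_bfold_le {n k c : Int} :
    ∀ (l : List (Int × Int)) (acc : Int × Int), acc.1 ≤ c →
      (∀ p ∈ l, 1 ≤ pvEats p.2 (pvVisits n k p.1) → pvLast n k p.1 p.2 ≤ c) →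
      (l.foldl (pvBStep n k) acc).1 ≤ c := by
  intro l
  induction l with
  | nil => intro acc hacc _; exact hacc
  | cons p l ih =>
    intro acc hacc h
    rw [List.foldl_cons]
    refine ih _ ?_ (fun q hq hq2 => h q (by simp [hq]) hq2)
    unfold pvBStep
    split_ifs with h1 h2
    · exact h p (by simp) h1
    · exact hacc
    · exact hacc

lemma pv_bfold_zero (ft0 : List Int) (n k : Int) (hk : k ≤ 0) :
    (PySem.List.enumerate ft0 0).foldl (pvBStep n k) (0, 0) = (0, 0) := by
  apply pv_bfold_id
  intro p hp he
  exfalso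
  obtain ⟨kk, hkk, rfl⟩ := (PySem.List.mem_enumerate_iff _ _ _).mp hp
  have hvis : pvVisits n k (0 + (kk : Int)) = 0 := by
    unfold pvVisits; rw [if_neg (by omega)]
  rw [hvis] at he
  unfold pvEats at he
  omega

-- ---------- Nat mod helpers ----------

lemma pv_mod2 (N m : ℕ) : (m % N + 1) % N = (m + 1) % N := by
  have h : (m % N + 1) + N * (m / N) = m + 1 := by
    rw [Nat.add_right_comm, Nat.mod_add_div]
  calc (m % N + 1) % N = ((m % N + 1) + N * (m / N)) % N := (Nat.add_mul_mod_self_left _ N _).symm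
    _ = (m + 1) % N := by rw [h]

lemma pv_mod_succ (N m : ℕ) (hN : 0 < N) :
    ((m + 1) % N = 0 ∧ m % N = N - 1) ∨ (m + 1) % N = m % N + 1 := by
  have h := (pv_mod2 N m).symm
  have hlt : m % N < N := Nat.mod_lt _ hN
  by_cases hc : m % N + 1 < N
  · right; rw [h, Nat.mod_eq_of_lt hc]
  · left
    have hceq : m % N + 1 = N := by omega
    constructor
    · rw [h, hceq, Nat.mod_self]
    · omega

lemma pv_mod_cast (N m : ℕ) (hN : 0 < N) :
    PySem.Int.mod ((m : Int) + 1) (N : Int) = (((m + 1) % N : ℕ) : Int) := by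
  rw [PySem.Int.mod_eq_emod_of_pos (by exact_mod_cast hN), Int.natCast_mod]
  norm_cast

lemma pv_mod_shift (N m : ℕ) (hN : 0 < N) :
    PySem.Int.mod ((m : Int) + 1) (N : Int) = PySem.Int.mod (((m % N : ℕ) : Int) + 1) (N : Int) := by
  rw [pv_mod_cast N m hN, show ((m % N : ℕ) : Int) + 1 = ((m % N + 1 : ℕ) : Int) by push_cast; ring,
    PySem.Int.mod_eq_emod_of_pos (by exact_mod_cast hN), ← Int.natCast_mod, pv_mod2]

-- ---------- Python index (i % n - 1) resolves to position m % N ----------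

lemma pv_idx_get (xs : List Int) (N : ℕ) (hx : xs.length = N) (hN : 0 < N) (m : ℕ) (d : Int) :
    PySem.List.pyGetD xs (PySem.Int.mod ((m : Int) + 1) (N : Int) - 1) d
      = xs[m % N]'(by rw [hx]; exact Nat.mod_lt _ hN) := by
  rw [pv_mod_cast N m hN]
  rcases pv_mod_succ N m hN with ⟨h0, hR⟩ | hR
  · rw [h0]
    norm_num
    have hne : xs ≠ [] := by intro hnil; rw [hnil] at hx; simp at hx; omega
    rw [PySem.List.pyGetD_neg_one xs d hne, List.getLast_eq_getElem]
    simp only [show xs.length - 1 = m % N by omega]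
  · rw [hR, show (((m % N + 1 : ℕ)) : Int) - 1 = ((m % N : ℕ) : Int) by push_cast; ring,
      PySem.List.pyGetD_natCast, List.getD_eq_getElem xs d (by rw [hx]; exact Nat.mod_lt _ hN)]

lemma pv_idx_set (xs : List Int) (N : ℕ) (hx : xs.length = N) (hN : 0 < N) (m : ℕ) (v : Int) :
    PySem.List.pySetD xs (PySem.Int.mod ((m : Int) + 1) (N : Int) - 1) v
      = xs.set (m % N) v := by
  rw [pv_mod_cast N m hN]
  rcases pv_mod_succ N m hN with ⟨h0, hR⟩ | hR
  · rw [h0]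
    norm_num
    unfold PySem.List.pySetD PySem.List.pySet? PySem.List.pyIdx?
    rw [if_neg (by norm_num), if_pos (by rw [hx]; omega)]
    simp only [Option.map_some, Option.getD_some, neg_neg, Int.toNat_one]
    rw [show xs.length - 1 = m % N by omega]
  · rw [hR, show (((m % N + 1 : ℕ)) : Int) - 1 = ((m % N : ℕ) : Int) by push_cast; ring,
      PySem.List.pySetD_natCast]

-- ---------- B's fold in the second where the (m+1)-th second eats ----------

lemma pv_bfold_eat (ft0 : List Int) (m : ℕ) (hN : 0 < ft0.length)
    (hv : pvVisits ((ft0.length : Int)) (m : Int) ((m % ft0.length : ℕ) : Int)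
            < max (ft0[m % ft0.length]'(Nat.mod_lt _ hN)) 0) :
    (PySem.List.enumerate ft0 0).foldl (pvBStep ((ft0.length : Int)) ((m : Int) + 1)) (0, 0)
      = ((m : Int) + 1, PySem.Int.mod (((m % ft0.length : ℕ) : Int) + 1) ((ft0.length : Int))) := by
  have hn : (0 : Int) < (ft0.length : Int) := by exact_mod_cast hN
  have hRN : m % ft0.length < ft0.length := Nat.mod_lt _ hN
  have hcastR : ((m % ft0.length : ℕ) : Int) = (m : Int) % (ft0.length : Int) :=
    Int.natCast_mod m ft0.length
  have hm0 : (0 : Int) ≤ (m : Int) := Int.natCast_nonneg m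
  have hsplit : ft0 = ft0.take (m % ft0.length) ++
      ft0[m % ft0.length]'hRN :: ft0.drop (m % ft0.length + 1) := by
    have h1 := List.take_append_drop (m % ft0.length) ft0
    rw [List.drop_eq_getElem_cons hRN] at h1
    exact h1.symm
  have hlt : (ft0.take (m % ft0.length)).length = m % ft0.length := by
    rw [List.length_take]; omega
  have henum : PySem.List.enumerate ft0 0
      = PySem.List.enumerate (ft0.take (m % ft0.length)) 0 ++
        (((m % ft0.length : ℕ) : Int), ft0[m % ft0.length]'hRN) ::
        PySem.List.enumerate (ft0.drop (m % ft0.length + 1)) (((m % ft0.length : ℕ) : Int) + 1) := by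
    conv_lhs => rw [hsplit]
    rw [PySem.List.enumerate_append, PySem.List.enumerate_cons, hlt, zero_add]
  rw [henum, List.foldl_append, List.foldl_cons]
  -- the prefix keeps the best step ≤ m
  have hacc1 : ((PySem.List.enumerate (ft0.take (m % ft0.length)) 0).foldl
      (pvBStep ((ft0.length : Int)) ((m : Int) + 1)) (0, 0)).1 ≤ (m : Int) := by
    apply pv_bfold_le _ _ (by simp)
    intro p hp he
    obtain ⟨kk, hkk, rfl⟩ := (PySem.List.mem_enumerate_iff _ _ _).mp hp
    rw [List.length_take] at hkk
    have hkkR : kk < m % ft0.length := by omega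
    dsimp only at he ⊢
    rw [zero_add] at he ⊢
    rw [List.getElem_take] at he ⊢
    obtain ⟨hle', heq'⟩ := pv_last_le (n := ((ft0.length : Int))) (m := (m : Int)) (j := (kk : Int))
      hn hm0 (by positivity) (by push_cast; omega) he
    by_cases hcase : pvLast ((ft0.length : Int)) ((m : Int) + 1) ((kk : Int))
        (ft0[kk]'(by omega)) = (m : Int) + 1
    · exfalso
      have h2 := heq' hcase
      rw [← hcastR] at h2
      have : kk = m % ft0.length := by exact_mod_cast h2
      omega
    · omega
  -- the step at position m % N sets the best step to m+1
  have hv' : pvVisits ((ft0.length : Int)) (m : Int) ((m : Int) % ((ft0.length : Int)))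
      < max (ft0[m % ft0.length]'hRN) 0 := by
    rw [← hcastR]; exact hv
  obtain ⟨he1, hl1⟩ := pv_last_eat (ft := ft0[m % ft0.length]'hRN) hn hm0 hv'
  rw [← hcastR] at he1 hl1
  have hstep : ∀ acc : Int × Int, acc.1 ≤ (m : Int) →
      pvBStep ((ft0.length : Int)) ((m : Int) + 1) acc
        ((((m % ft0.length : ℕ)) : Int), ft0[m % ft0.length]'hRN)
      = ((m : Int) + 1, PySem.Int.mod (((m % ft0.length : ℕ) : Int) + 1) ((ft0.length : Int))) := by
    intro acc hacc
    unfold pvBStep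
    dsimp only
    rw [if_pos he1, if_pos (by rw [hl1]; omega), hl1]
  rw [hstep _ hacc1]
  -- the suffix cannot beat m+1
  apply pv_bfold_id
  intro p hp he
  obtain ⟨kk, hkk, rfl⟩ := (PySem.List.mem_enumerate_iff _ _ _).mp hp
  rw [List.length_drop] at hkk
  dsimp only at he ⊢
  have hb := pv_last_le (n := ((ft0.length : Int))) (m := (m : Int))
    (j := ((m % ft0.length : ℕ) : Int) + 1 + (kk : Int)) hn hm0 (by positivity)
    (by push_cast; omega) he
  have := hb.1
  omega

-- ---------- the food-state closed form at k = 0 ----------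

lemma pv_fstate_zero (ft0 : List Int) : pvFState ft0 0 = ft0 := by
  apply List.ext_getElem
  · simp [pvFState]
  · intro i h1 h2
    simp only [pvFState, List.getElem_mapIdx]
    have hvis : pvVisits ((ft0.length : Int)) 0 ((i : ℕ) : Int) = 0 := by
      unfold pvVisits; rw [if_neg (by omega)]
    rw [hvis]
    unfold pvEats
    omega

-- ---------- the main invariant: A's loop state after m seconds ----------

lemma pvInv (ft0 : List Int) (hne : ft0 ≠ []) (m : ℕ) :
    (PySem.List.pyRange 1 ((m : Int) + 1) 1).foldl (pvAStep ((ft0.length : Int))) (ft0, 0)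
      = (pvFState ft0 (m : Int),
         ((PySem.List.enumerate ft0 0).foldl (pvBStep ((ft0.length : Int)) (m : Int)) (0, 0)).2) := by
  have hN : 0 < ft0.length := List.length_pos_iff.mpr hne
  have hn : (0 : Int) < (ft0.length : Int) := by exact_mod_cast hN
  induction m with
  | zero =>
    rw [show ((0 : ℕ) : Int) + 1 = 1 by norm_num, PySem.List.pyRange_one_eq_nil le_rfl,
      List.foldl_nil, show ((0 : ℕ) : Int) = (0 : Int) by norm_num, pv_fstate_zero,
      pv_bfold_zero ft0 _ 0 le_rfl]
  | succ m ih =>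
    have hc2 : ((m + 1 : ℕ) : Int) = (m : Int) + 1 := by push_cast; ring
    rw [hc2, show (m : Int) + 1 + 1 = ((m : Int) + 1) + 1 by ring,
      PySem.List.pyRange_one_succ_right (by omega : (1 : Int) ≤ (m : Int) + 1),
      List.foldl_append, ih, List.foldl_cons, List.foldl_nil]
    have hRN : m % ft0.length < ft0.length := Nat.mod_lt _ hN
    have hcastR : ((m % ft0.length : ℕ) : Int) = (m : Int) % (ft0.length : Int) :=
      Int.natCast_mod m ft0.length
    have hm0 : (0 : Int) ≤ (m : Int) := Int.natCast_nonneg m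
    have hlen : (pvFState ft0 (m : Int)).length = ft0.length := by simp [pvFState]
    have hRlt : m % ft0.length < (pvFState ft0 (m : Int)).length := by omega
    have hvalR : (pvFState ft0 (m : Int))[m % ft0.length]'hRlt
        = ft0[m % ft0.length]'hRN -
          pvEats (ft0[m % ft0.length]'hRN)
            (pvVisits ((ft0.length : Int)) (m : Int) ((m % ft0.length : ℕ) : Int)) := by
      simp [pvFState, List.getElem_mapIdx]
    have hv0 : 0 ≤ pvVisits ((ft0.length : Int)) (m : Int) ((m % ft0.length : ℕ) : Int) :=
      pv_visits_nonneg hn (Int.natCast_nonneg _)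
    unfold pvAStep
    dsimp only
    rw [pv_idx_get (pvFState ft0 (m : Int)) ft0.length hlen hN m 0, hvalR]
    by_cases hv : pvVisits ((ft0.length : Int)) (m : Int) ((m % ft0.length : ℕ) : Int)
        < max (ft0[m % ft0.length]'hRN) 0
    · -- the (m+1)-th second eats at position m % N
      rw [if_neg (by have h := pv_eatcond (ft := ft0[m % ft0.length]'hRN) hv0; omega)]
      simp only [Prod.mk.injEq]
      constructor
      · rw [pv_idx_set (pvFState ft0 (m : Int)) ft0.length hlen hN m _]
        apply List.ext_getElem
        · simp [pvFState]
        · intro i hi1 hi2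
          have hiN : i < ft0.length := by
            have := hi1; rw [List.length_set, hlen] at this; exact this
          by_cases hiR : i = m % ft0.length
          · subst hiR
            rw [List.getElem_set_self]
            simp only [pvFState, List.getElem_mapIdx]
            rw [pv_visits_succ hn (Int.natCast_nonneg _) (by exact_mod_cast hRN) hm0,
              if_pos hcastR, pv_eats_succ hv0, if_pos hv]
            ring
          · rw [List.getElem_set_ne (fun h => hiR h.symm)]
            simp only [pvFState, List.getElem_mapIdx]
            rw [pv_visits_succ hn (Int.natCast_nonneg _) (by exact_mod_cast hiN) hm0,
              if_neg (by rw [← hcastR]; exact_mod_cast fun h => hiR (by exact_mod_cast h)),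
              add_zero]
      · rw [pv_bfold_eat ft0 m hN hv]
        exact pv_mod_shift ft0.length m hN
    · -- nobody eats in the (m+1)-th second
      rw [if_pos (by have h := pv_eatcond (ft := ft0[m % ft0.length]'hRN) hv0; omega)]
      simp only [Prod.mk.injEq]
      constructor
      · apply List.ext_getElem
        · simp [pvFState]
        · intro i hi1 hi2
          simp only [pvFState, List.getElem_mapIdx]
          have hiN : i < ft0.length := by simpa [pvFState] using hi1
          by_cases hiR : i = m % ft0.length
          · subst hiR
            rw [pv_visits_succ hn (Int.natCast_nonneg _) (by exact_mod_cast hiN) hm0,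
              if_pos hcastR, pv_eats_succ hv0, if_neg hv, add_zero]
          · rw [pv_visits_succ hn (Int.natCast_nonneg _) (by exact_mod_cast hiN) hm0,
              if_neg (by rw [← hcastR]; exact_mod_cast fun h => hiR (by exact_mod_cast h)),
              add_zero]
      · apply congrArg
        apply PySem.List.foldl_congr_mem
        intro acc p hp
        obtain ⟨kk, hkk, rfl⟩ := (PySem.List.mem_enumerate_iff _ _ _).mp hp
        have heats : pvEats (ft0[kk]'hkk)
              (pvVisits ((ft0.length : Int)) ((m : Int) + 1) ((kk : ℕ) : Int))
            = pvEats (ft0[kk]'hkk)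
              (pvVisits ((ft0.length : Int)) (m : Int) ((kk : ℕ) : Int)) := by
          by_cases hkR : kk = m % ft0.length
          · subst hkR
            rw [pv_visits_succ hn (Int.natCast_nonneg _) (by exact_mod_cast hkk) hm0,
              if_pos hcastR, pv_eats_succ hv0, if_neg hv, add_zero]
          · rw [pv_visits_succ hn (Int.natCast_nonneg _) (by exact_mod_cast hkk) hm0,
              if_neg (by rw [← hcastR]; exact_mod_cast fun h => hkR (by exact_mod_cast h)),
              add_zero]
        unfold pvBStep pvLast
        dsimp only
        rw [zero_add, heats]

-- ===== VERDICT (by name: the statement is the Claim_ definition above) =====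
theorem solution_spec : Claim_equal_solution := by
  intro ft k hdom hpre
  unfold Spec_solution
  rw [pv_sol_eq, pv_alt_eq]
  by_cases hk : k ≤ 0
  · rw [PySem.List.pyRange_one_eq_nil (by omega), List.foldl_nil,
      pv_bfold_zero ft _ k hk]
  · have hne : ft ≠ [] := hpre.resolve_right (by omega)
    have hk0 : k = ((k.toNat : ℕ) : Int) := by rw [Int.toNat_of_nonneg (by omega)]
    rw [hk0, pvInv ft hne k.toNat]
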